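-- pv_equiv track=rewrite | github.com/AhmadMous/SE-Factory-FCS | Section 2/13 - List Jumps.py | list_jumps
-- ===== SOURCE A (Python) =====
-- def list_jumps(jumps):
--
--     # Holds value of current index, starts at 0
--     index = 0
--
--     # Holds the length of the list
--     length = len(jumps)
--
--     # Keeps track of visited indices
--     visited = []
--
--     # Jump between indices, till you reach a previously visited index, or go out of bounds
--     while True:
--         if index >= length or index < 0:
--             return 'out-of-bounds'
--
--         if index in visited:
--             return 'cycle'
--
--         else:
--             visited.append(index)
--             index += jumps[index]
-- ===== SOURCE B (Python) =====
-- def list_jumps(jumps):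
--     # Pigeonhole: a walk that stays in bounds for len(jumps)+1 steps must have
--     # revisited one of the at most len(jumps) indices, and a revisiting walk
--     # stays in bounds forever, so no visited collection is needed: the cursor
--     # is threaded through a fixed number of bounded steps.
--     pos = 0
--     for _ in range(len(jumps) + 1):
--         if not (0 <= pos < len(jumps)):
--             return 'out-of-bounds'
--         pos += jumps[pos]
--     return 'cycle'
-- ===== Notes on version B (the rewrite author's own statement) =====
-- stated objective: simpler
-- what changed: Replaces the unbounded while-loop with a growing visited list and its membership scan by a fixed count of len(jumps)+1 bounded steps threading only a cursor: by pigeonhole a walk in bounds for n+1 steps has revisited an index and therefore cycles, so no visited collection exists at all.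
import Mathlib
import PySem

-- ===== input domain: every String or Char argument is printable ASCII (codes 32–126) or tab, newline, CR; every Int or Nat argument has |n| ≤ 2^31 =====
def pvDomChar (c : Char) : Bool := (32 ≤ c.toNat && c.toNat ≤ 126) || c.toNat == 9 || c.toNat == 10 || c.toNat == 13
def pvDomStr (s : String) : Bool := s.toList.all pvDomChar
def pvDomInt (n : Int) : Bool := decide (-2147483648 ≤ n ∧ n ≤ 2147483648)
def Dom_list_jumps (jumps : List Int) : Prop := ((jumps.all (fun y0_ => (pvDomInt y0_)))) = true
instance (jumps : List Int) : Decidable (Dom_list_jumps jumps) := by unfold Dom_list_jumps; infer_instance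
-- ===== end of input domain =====

-- B drops A's visited list (linear membership scan each step) and instead runs exactly
-- len(jumps)+1 bounded steps of a lone cursor, answering "cycle" if all stay in bounds
-- (pigeonhole); same return value on every input.

-- ===== PORT A =====
-- A's 'while True' loop; the fuel only makes it total (jumps.length + 1 is always
-- enough: each non-returning iteration appends a fresh in-bounds index to visited).
def pvLoopA (jumps : List Int) : Int → List Int → Nat → String
  | _, _, 0 => "cycle"      -- unreachable with the initial fuel
  | index, visited, fuel + 1 =>
    if (jumps.length : Int) ≤ index ∨ index < 0 then "out-of-bounds"
    else if index ∈ visited then "cycle"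
    else pvLoopA jumps (index + (PySem.List.pyGet? jumps index).getD 0) (visited ++ [index]) fuel

def list_jumps (jumps : List Int) : String :=
  pvLoopA jumps 0 [] (jumps.length + 1)

-- ===== PORT B =====
-- one iteration of B's for-body: the cursor, or none once 'out-of-bounds' was returned
def pvCursor (jumps : List Int) (p : Option Int) : Option Int :=
  p.bind fun pos =>
    if 0 ≤ pos ∧ pos < (jumps.length : Int)
    then some (pos + (PySem.List.pyGet? jumps pos).getD 0)
    else none

def list_jumps_alt (jumps : List Int) : String :=
  match (List.range (jumps.length + 1)).foldl (fun acc _ => pvCursor jumps acc) (some 0) with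
  | none => "out-of-bounds"
  | some _ => "cycle"

-- ===== PRECONDITION & SPEC =====
def Spec_list_jumps (jumps : List Int) (out : String) : Prop := out = list_jumps_alt jumps
instance (jumps : List Int) (out : String) : Decidable (Spec_list_jumps jumps out) := by unfold Spec_list_jumps; infer_instance

-- ===== CLAIM (what is proved, stated in full; the proofs are below) =====
def Claim_equal_list_jumps : Prop := ∀ (jumps : List Int), Dom_list_jumps jumps → Spec_list_jumps jumps (list_jumps jumps)

-- ===== LEMMAS AND PROOFS =====

-- folding a constant-element step over a range is iteration
lemma pvFoldRange {α : Type} (f : α → α) : ∀ (n : Nat) (a : α),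
    (List.range n).foldl (fun acc _ => f acc) a = f^[n] a := by
  intro n
  induction n with
  | zero => intro a; rfl
  | succ m ih =>
    intro a
    rw [List.range_succ, List.foldl_append, ih, Function.iterate_succ_apply']
    rfl

-- none is absorbing for the cursor
lemma pvCursor_none (jumps : List Int) : ∀ k, (pvCursor jumps)^[k] none = none := by
  intro k
  induction k with
  | zero => rfl
  | succ m ih => rw [Function.iterate_succ_apply]; exact ih

-- visited is exactly the walk so far: each recorded index steps to the next one,
-- and the last recorded index steps to the current index.
def pvRun (jumps : List Int) (v : List Int) (index : Int) : Prop :=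
  ∀ i (h : i < v.length),
    v[i] + (PySem.List.pyGet? jumps v[i]).getD 0 =
      if h2 : i + 1 < v.length then v[i + 1] else index

-- a nodup list of integers all in [0, n) has length ≤ n
lemma pvLen_le (n : Nat) (v : List Int) (hnd : v.Nodup)
    (hb : ∀ x ∈ v, 0 ≤ x ∧ x < (n : Int)) : v.length ≤ n := by
  have hsub : v.toFinset ⊆ Finset.Ico (0 : Int) n := by
    intro x hx
    rw [List.mem_toFinset] at hx
    have := hb x hx
    simp [Finset.mem_Ico, this.1, this.2]
  have hcard := Finset.card_le_card hsub
  rw [List.toFinset_card_of_nodup hnd] at hcard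
  simpa using hcard

-- once inside a step-closed set of in-bounds indices, the cursor never dies
lemma pvCursor_closed (jumps : List Int) (v : List Int)
    (hcl : ∀ x ∈ v, (0 ≤ x ∧ x < (jumps.length : Int)) ∧
                    x + (PySem.List.pyGet? jumps x).getD 0 ∈ v) :
    ∀ k x, x ∈ v → ∃ y ∈ v, (pvCursor jumps)^[k] (some x) = some y := by
  intro k
  induction k with
  | zero => intro x hx; exact ⟨x, hx, rfl⟩
  | succ m ih =>
    intro x hx
    obtain ⟨⟨h0, h1⟩, hstep⟩ := hcl x hx
    rw [Function.iterate_succ_apply]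
    have : pvCursor jumps (some x) = some (x + (PySem.List.pyGet? jumps x).getD 0) := by
      simp [pvCursor, h0, h1]
    rw [this]
    exact ih _ hstep

-- main invariant: with the walk recorded in v, A's loop matches k cursor iterations
lemma pvMain (jumps : List Int) :
    ∀ (k : Nat) (v : List Int) (index : Int),
      v.Nodup → (∀ x ∈ v, 0 ≤ x ∧ x < (jumps.length : Int)) →
      pvRun jumps v index → v.length + k = jumps.length + 1 →
      pvLoopA jumps index v k =
        (match (pvCursor jumps)^[k] (some index) with
         | none => "out-of-bounds"
         | some _ => "cycle") := by
  intro k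
  induction k with
  | zero =>
    intro v index hnd hb _ hlen
    have := pvLen_le jumps.length v hnd hb
    omega
  | succ f ih =>
    intro v index hnd hb hrun hlen
    rw [pvLoopA]
    by_cases hoob : index < 0 ∨ (jumps.length : Int) ≤ index
    · rw [if_pos (by omega)]
      have hdead : pvCursor jumps (some index) = none := by
        simp only [pvCursor, Option.bind_some]
        rw [if_neg (by omega)]
      rw [Function.iterate_succ_apply, hdead, pvCursor_none]
    · rw [if_neg (by omega)]
      by_cases hmem : index ∈ v
      · rw [if_pos hmem]
        -- v is step-closed: each recorded index steps into v (the last steps to index ∈ v)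
        have hcl : ∀ x ∈ v, (0 ≤ x ∧ x < (jumps.length : Int)) ∧
            x + (PySem.List.pyGet? jumps x).getD 0 ∈ v := by
          intro x hx
          refine ⟨hb x hx, ?_⟩
          obtain ⟨i, hi, hxe⟩ := List.mem_iff_getElem.mp hx
          have := hrun i hi
          rw [hxe] at this
          by_cases h2 : i + 1 < v.length
          · rw [dif_pos h2] at this; rw [this]; exact List.getElem_mem _
          · rw [dif_neg h2] at this; rw [this]; exact hmem
        obtain ⟨y, _, hy⟩ := pvCursor_closed jumps v hcl (f + 1) index hmem
        rw [hy]
      · rw [if_neg hmem]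
        have hstep : pvCursor jumps (some index) =
            some (index + (PySem.List.pyGet? jumps index).getD 0) := by
          simp only [pvCursor, Option.bind_some]
          rw [if_pos (by omega)]
        rw [Function.iterate_succ_apply, hstep]
        apply ih (v ++ [index])
        · rw [List.nodup_append]
          refine ⟨hnd, by simp, ?_⟩
          intro a ha b hb
          rw [List.mem_singleton] at hb
          subst hb
          exact fun hab => hmem (hab ▸ ha)
        · intro x hx
          rcases List.mem_append.mp hx with h | h
          · exact hb x h
          · simp at h; subst h; omega
        · -- the extended list is still the recorded walk
          intro i hi
          simp only [List.length_append, List.length_cons, List.length_nil] at hi ⊢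
          by_cases hlt : i < v.length
          · rw [List.getElem_append_left hlt]
            have := hrun i hlt
            by_cases h2 : i + 1 < v.length
            · rw [dif_pos h2] at this
              rw [dif_pos (by omega), this, List.getElem_append_left h2]
            · rw [dif_neg h2] at this
              have hieq : i + 1 = v.length := by omega
              rw [dif_pos (by omega), this, List.getElem_append_right (by omega)]
              simp [hieq]
          · have hieq : i = v.length := by omega
            rw [List.getElem_append_right (by omega), dif_neg (by omega)]
            simp [hieq]
        · simp; omega

-- ===== VERDICT (by name: the statement is the Claim_ definition above) =====
theorem list_jumps_spec : Claim_equal_list_jumps := by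
  intro jumps _
  unfold Spec_list_jumps list_jumps list_jumps_alt
  rw [pvFoldRange]
  exact pvMain jumps (jumps.length + 1) [] 0 List.nodup_nil (by simp)
    (by intro i hi; simp at hi) (by simp)
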